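-- pv_equiv track=rewrite | github.com/Dibyajyoti-Pradhan/Coding | Python Playground/06_sliding_window.py | min_consecutive_cards_to_pick_up
-- ===== SOURCE A (Python) =====
-- from typing import List, Dict
--
-- def min_consecutive_cards_to_pick_up(cards: List[int]) -> int:
--     """
--     LeetCode 2260 - Minimum consecutive cards to pick up a pair.
--
--     Time: O(n), Space: O(n)
--     """
--     last_seen = {}
--     min_length = float('inf')
--
--     for i, card in enumerate(cards):
--         if card in last_seen:
--             min_length = min(min_length, i - last_seen[card] + 1)
--         last_seen[card] = i
--
--     return min_length if min_length != float('inf') else -1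
-- ===== SOURCE B (Python) =====
-- from typing import List
--
--
-- def min_consecutive_cards_to_pick_up(cards: List[int]) -> int:
--     # Two phases: group all indices by card value, then scan adjacent
--     # occurrence gaps inside each group, folding a global minimum.
--     positions = {}
--     for i, card in enumerate(cards):
--         positions.setdefault(card, []).append(i)
--     best = -1
--     for idxs in positions.values():
--         for a, b in zip(idxs, idxs[1:]):
--             gap = b - a + 1
--             if best == -1 or gap < best:
--                 best = gap
--     return best
-- ===== Notes on version B (the rewrite author's own statement) =====
-- stated objective: alternative
-- what changed: A keeps a last-seen index and folds the minimum inside one combined loop; B separates the work into a grouping pass (value -> list of all its indices) followed by a second pass scanning adjacent index pairs within each group, with a -1 sentinel instead of float('inf').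
import Mathlib
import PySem

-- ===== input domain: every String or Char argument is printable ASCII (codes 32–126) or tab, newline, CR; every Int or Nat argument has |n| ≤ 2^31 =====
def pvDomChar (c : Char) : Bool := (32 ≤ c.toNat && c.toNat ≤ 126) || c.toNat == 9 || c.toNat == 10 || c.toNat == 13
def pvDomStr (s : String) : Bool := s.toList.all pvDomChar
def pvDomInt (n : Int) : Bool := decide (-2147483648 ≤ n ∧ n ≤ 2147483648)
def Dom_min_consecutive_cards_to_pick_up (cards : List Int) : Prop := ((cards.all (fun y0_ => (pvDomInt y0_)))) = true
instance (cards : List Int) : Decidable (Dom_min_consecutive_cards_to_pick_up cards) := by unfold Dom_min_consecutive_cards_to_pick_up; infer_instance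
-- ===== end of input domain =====

-- B replaces A's single last-seen-index loop by a grouping pass (value -> all its indices)
-- followed by a per-group adjacent-gap scan; proved to return the same value on all inputs.


-- ===== PORT A =====
-- min(min_length, g) with min_length possibly float('inf'): none plays inf
def pyMinInf (m : Option Int) (x : Int) : Option Int :=
  some (match m with | none => x | some v => min v x)

-- one iteration of A's loop over (i, card)
def aStep (st : PySem.Dict Int Int × Option Int) (p : Int × Int) :
    PySem.Dict Int Int × Option Int :=
  match st.1.get? p.2 with
  | some j => (st.1.insert p.2 p.1, pyMinInf st.2 (p.1 - j + 1))
  | none => (st.1.insert p.2 p.1, st.2)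

def min_consecutive_cards_to_pick_up (cards : List Int) : Int :=
  match ((PySem.List.enumerate cards).foldl aStep (PySem.Dict.empty, none)).2 with
  | some v => v
  | none => -1

-- ===== PORT B =====
-- positions.setdefault(card, []).append(i)
def bGroup (d : PySem.Dict Int (List Int)) (p : Int × Int) : PySem.Dict Int (List Int) :=
  d.modify p.2 [] (· ++ [p.1])

-- body of the inner loop over an adjacent pair (a, b)
def bInner (best : Int) (p : Int × Int) : Int :=
  let gap := p.2 - p.1 + 1
  if best == -1 || gap < best then gap else best

-- inner loop: for a, b in zip(idxs, idxs[1:])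
def bScan (best : Int) (idxs : List Int) : Int :=
  (idxs.zip (idxs.drop 1)).foldl bInner best

def min_consecutive_cards_to_pick_up_alt (cards : List Int) : Int :=
  let positions := (PySem.List.enumerate cards).foldl bGroup PySem.Dict.empty
  positions.values.foldl bScan (-1)

-- ===== PRECONDITION & SPEC =====
def Spec_min_consecutive_cards_to_pick_up (cards : List Int) (out : Int) : Prop := out = min_consecutive_cards_to_pick_up_alt cards
instance (cards : List Int) (out : Int) : Decidable (Spec_min_consecutive_cards_to_pick_up cards out) := by unfold Spec_min_consecutive_cards_to_pick_up; infer_instance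

-- ===== CLAIM (what is proved, stated in full; the proofs are below) =====
def Claim_equal_min_consecutive_cards_to_pick_up : Prop := ∀ (cards : List Int), Dom_min_consecutive_cards_to_pick_up cards → Spec_min_consecutive_cards_to_pick_up cards (min_consecutive_cards_to_pick_up cards)

-- ===== LEMMAS AND PROOFS =====

-- abstract per-list gap fold and its fold over all groups
def foldGaps (m : Option Int) (L : List Int) : Option Int :=
  (L.zip (L.drop 1)).foldl (fun m p => pyMinInf m (p.2 - p.1 + 1)) m

def Fv (m : Option Int) (vs : List (List Int)) : Option Int := vs.foldl foldGaps m

-- the Option Int ↔ Int (-1 = no pair yet) encoding B uses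
def enc : Option Int → Int
  | none => -1
  | some v => v

def Mv (d : PySem.Dict Int (List Int)) : Option Int :=
  Fv none (d.keys.map (fun k => d.getD k []))

def IncL (L : List Int) : Prop := ∀ p ∈ L.zip (L.drop 1), p.1 < p.2

-- loop invariant tying A's state (last, m) to B's grouping dict after the same prefix
def AInv (d : PySem.Dict Int (List Int)) (last : PySem.Dict Int Int) (m : Option Int) (n : Int) : Prop :=
  d.keys.Nodup ∧
  (∀ v, last.get? v = (d.getD v []).getLast?) ∧
  (∀ k ∈ d.keys, d.getD k [] ≠ []) ∧
  (∀ k : Int, IncL (d.getD k [])) ∧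
  (∀ k : Int, ∀ x ∈ d.getD k [], x < n) ∧
  m = Mv d

theorem pyMinInf_comm (m : Option Int) (x y : Int) :
    pyMinInf (pyMinInf m x) y = pyMinInf (pyMinInf m y) x := by
  cases m <;> simp [pyMinInf] <;> omega

theorem foldl_pyMinInf_pull {α : Type} (f : α → Int) (l : List α) (m : Option Int) (g : Int) :
    l.foldl (fun m p => pyMinInf m (f p)) (pyMinInf m g)
      = pyMinInf (l.foldl (fun m p => pyMinInf m (f p)) m) g := by
  induction l generalizing m with
  | nil => rfl
  | cons a l ih =>
    simp only [List.foldl_cons]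
    rw [pyMinInf_comm m g (f a)]
    exact ih _

theorem foldGaps_pull (L : List Int) (m : Option Int) (g : Int) :
    foldGaps (pyMinInf m g) L = pyMinInf (foldGaps m L) g :=
  foldl_pyMinInf_pull _ _ m g

theorem Fv_pull (vs : List (List Int)) (m : Option Int) (g : Int) :
    Fv (pyMinInf m g) vs = pyMinInf (Fv m vs) g := by
  induction vs generalizing m with
  | nil => rfl
  | cons L vs ih =>
    simp only [Fv, List.foldl_cons, foldGaps_pull]
    exact ih _

theorem adjPairs_append (L : List Int) (i : Int) :
    (L ++ [i]).zip ((L ++ [i]).drop 1)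
      = L.zip (L.drop 1) ++ (L.getLast?.map (fun a => (a, i))).toList := by
  induction L with
  | nil => simp
  | cons x xs ih =>
    cases xs with
    | nil => simp
    | cons y ys =>
      simp only [List.cons_append, List.drop_succ_cons, List.drop_zero, List.zip_cons_cons] at *
      simp [ih]

theorem foldGaps_append (m : Option Int) (L : List Int) (i : Int) :
    foldGaps m (L ++ [i]) = match L.getLast? with
      | none => m
      | some a => pyMinInf (foldGaps m L) (i - a + 1) := by
  unfold foldGaps
  rw [adjPairs_append]
  cases h : L.getLast? with
  | none => simp [List.getLast?_eq_none_iff.mp h]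
  | some a => simp [List.foldl_append]

theorem Fv_mid (A B : List (List Int)) (m : Option Int) (x : List Int) :
    Fv m (A ++ x :: B) = Fv (foldGaps (Fv m A) x) B := by
  simp [Fv, List.foldl_append]

theorem Mv_modify (d : PySem.Dict Int (List Int)) (hnd : d.keys.Nodup)
    (hne : ∀ k ∈ d.keys, d.getD k [] ≠ []) (c i : Int) :
    Mv (d.modify c [] (· ++ [i])) = match (d.getD c []).getLast? with
      | none => Mv d
      | some a => pyMinInf (Mv d) (i - a + 1) := by
  by_cases hc : c ∈ d.keys
  · -- existing key: its list is replaced in place, adding exactly one adjacent pair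
    have hL : d.getD c [] ≠ [] := hne c hc
    obtain ⟨a, ha⟩ : ∃ a, (d.getD c []).getLast? = some a := by
      cases h : (d.getD c []).getLast? with
      | none => exact absurd (List.getLast?_eq_none_iff.mp h) hL
      | some a => exact ⟨a, rfl⟩
    have hkeys : (d.modify c [] (· ++ [i])).keys = d.keys := by
      rw [PySem.Dict.keys_modify, PySem.Dict.keys_insert_of_contains]
      exact (PySem.Dict.contains_iff_mem_keys d c).mpr hc
    obtain ⟨K1, K2, hsplit⟩ := List.append_of_mem hc
    have hnd' := hnd
    rw [hsplit] at hnd'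
    simp [List.nodup_append] at hnd'
    have hc1 : c ∉ K1 := fun h => (hnd'.2.2 c h).1 rfl
    have hc2 : c ∉ K2 := hnd'.2.1.1
    have hmap1 : K1.map (fun k => (d.modify c [] (· ++ [i])).getD k []) =
        K1.map (fun k => d.getD k []) :=
      List.map_congr_left fun k hk =>
        PySem.Dict.getD_modify_of_ne d [] _ (fun he => hc1 (he ▸ hk))
    have hmap2 : K2.map (fun k => (d.modify c [] (· ++ [i])).getD k []) =
        K2.map (fun k => d.getD k []) :=
      List.map_congr_left fun k hk =>
        PySem.Dict.getD_modify_of_ne d [] _ (fun he => hc2 (he ▸ hk))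
    rw [ha]
    unfold Mv
    rw [hkeys, hsplit, List.map_append, List.map_cons, List.map_append, List.map_cons,
      hmap1, hmap2, PySem.Dict.getD_modify_self, Fv_mid, Fv_mid, foldGaps_append, ha,
      Fv_pull]
  · -- fresh key: a one-element list is appended; it contributes no adjacent pair
    have hcont : d.contains c = false := by
      rw [← Bool.not_eq_true, PySem.Dict.contains_iff_mem_keys]; exact hc
    have hgd : d.getD c [] = [] := PySem.Dict.getD_of_not_contains d [] hcont
    have hkeys : (d.modify c [] (· ++ [i])).keys = d.keys ++ [c] := by
      rw [PySem.Dict.keys_modify, PySem.Dict.keys_insert_of_not_contains d _ hcont]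
    have hmap : d.keys.map (fun k => (d.modify c [] (· ++ [i])).getD k []) =
        d.keys.map (fun k => d.getD k []) :=
      List.map_congr_left fun k hk =>
        PySem.Dict.getD_modify_of_ne d [] _ (fun he => hc (he ▸ hk))
    simp only [hgd, List.getLast?_nil]
    unfold Mv
    rw [hkeys, List.map_append, List.map_cons, List.map_nil, hmap,
      PySem.Dict.getD_modify_self, hgd]
    simp [Fv, List.foldl_append, foldGaps]

theorem bInner_enc (m : Option Int) (p : Int × Int) (hp : p.1 < p.2)
    (hm : ∀ v, m = some v → 0 ≤ v) :
    bInner (enc m) p = enc (pyMinInf m (p.2 - p.1 + 1)) ∧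
      (∀ v, pyMinInf m (p.2 - p.1 + 1) = some v → 0 ≤ v) := by
  cases m with
  | none => simp [bInner, enc, pyMinInf]; omega
  | some v =>
    have hv : 0 ≤ v := hm v rfl
    constructor
    · have hne : (v == -1) = false := by simp; omega
      simp only [bInner, enc, pyMinInf, hne, Bool.false_or, decide_eq_true_eq]
      rw [Int.min_def]
      split_ifs <;> omega
    · intro w hw
      simp only [pyMinInf, Option.some.injEq] at hw
      omega

theorem zipfold_enc (zl : List (Int × Int)) (m : Option Int)
    (h : ∀ p ∈ zl, p.1 < p.2) (hm : ∀ v, m = some v → 0 ≤ v) :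
    zl.foldl bInner (enc m) = enc (zl.foldl (fun m p => pyMinInf m (p.2 - p.1 + 1)) m) ∧
      (∀ v, zl.foldl (fun m p => pyMinInf m (p.2 - p.1 + 1)) m = some v → 0 ≤ v) := by
  induction zl generalizing m with
  | nil => exact ⟨rfl, hm⟩
  | cons p zl ih =>
    obtain ⟨h1, h2⟩ := bInner_enc m p (h p (List.mem_cons_self ..)) hm
    simp only [List.foldl_cons, h1]
    exact ih _ (fun q hq => h q (List.mem_cons_of_mem _ hq)) h2

theorem bScan_enc (L : List Int) (m : Option Int) (hL : IncL L)
    (hm : ∀ v, m = some v → 0 ≤ v) :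
    bScan (enc m) L = enc (foldGaps m L) ∧ (∀ v, foldGaps m L = some v → 0 ≤ v) :=
  zipfold_enc _ m hL hm

theorem values_fold_enc (vs : List (List Int)) (m : Option Int)
    (h : ∀ L ∈ vs, IncL L) (hm : ∀ v, m = some v → 0 ≤ v) :
    vs.foldl bScan (enc m) = enc (Fv m vs) := by
  induction vs generalizing m with
  | nil => rfl
  | cons L vs ih =>
    obtain ⟨h1, h2⟩ := bScan_enc L m (h L (List.mem_cons_self ..)) hm
    simp only [Fv, List.foldl_cons, h1]
    exact ih _ (fun q hq => h q (List.mem_cons_of_mem _ hq)) h2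

theorem loop_inv (l : List Int) (s : Int) (d : PySem.Dict Int (List Int))
    (last : PySem.Dict Int Int) (m : Option Int) (h : AInv d last m s) :
    AInv ((PySem.List.enumerate l s).foldl bGroup d)
      ((PySem.List.enumerate l s).foldl aStep (last, m)).1
      ((PySem.List.enumerate l s).foldl aStep (last, m)).2
      (s + l.length) := by
  induction l generalizing s d last m with
  | nil => simpa using h
  | cons x xs ih =>
    rw [PySem.List.enumerate_cons]
    simp only [List.foldl_cons]
    obtain ⟨hnd, hlast, hne, hinc, hbnd, hm⟩ := h
    have hstep : AInv (bGroup d (s, x)) (aStep (last, m) (s, x)).1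
        (aStep (last, m) (s, x)).2 (s + 1) := by
      have hMv := Mv_modify d hnd hne x s
      have haStep : aStep (last, m) (s, x) = match (d.getD x []).getLast? with
          | none => (last.insert x s, m)
          | some j => (last.insert x s, pyMinInf m (s - j + 1)) := by
        simp only [aStep, hlast x]
        cases (d.getD x []).getLast? <;> rfl
      have hd1keys : ∀ k : Int, k ∈ (bGroup d (s, x)).keys ↔ k = x ∨ k ∈ d.keys := by
        intro k
        unfold bGroup
        rw [PySem.Dict.keys_modify]
        exact PySem.Dict.mem_keys_insert ..
      have hd1self : (bGroup d (s, x)).getD x [] = d.getD x [] ++ [s] :=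
        PySem.Dict.getD_modify_self ..
      have hd1ne : ∀ k : Int, k ≠ x → (bGroup d (s, x)).getD k [] = d.getD k [] :=
        fun k hk => PySem.Dict.getD_modify_of_ne d [] _ hk
      refine ⟨?_, ?_, ?_, ?_, ?_, ?_⟩
      · unfold bGroup
        rw [PySem.Dict.keys_modify]
        exact PySem.Dict.nodup_keys_insert _ _ _ hnd
      · intro v
        rw [haStep]
        by_cases hv : v = x
        · subst hv
          cases hgl : (d.getD v []).getLast? <;>
            simp [hd1self]
        · cases hgl : (d.getD x []).getLast? <;>
            simp only [PySem.Dict.get?_insert] <;>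
            rw [if_neg hv, hd1ne v hv, hlast v]
      · intro k hk
        by_cases hkx : k = x
        · subst hkx; simp [hd1self]
        · rw [hd1ne k hkx]
          exact hne k (((hd1keys k).mp hk).resolve_left hkx)
      · intro k
        by_cases hkx : k = x
        · subst hkx
          rw [hd1self]
          intro p hp
          rw [adjPairs_append] at hp
          rcases List.mem_append.mp hp with hp | hp
          · exact hinc k p hp
          · cases hgl : (d.getD k []).getLast? with
            | none => rw [hgl] at hp; simp at hp
            | some a =>
              rw [hgl] at hp
              simp only [Option.map_some, Option.toList_some, List.mem_singleton] at hp
              subst hp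
              exact hbnd k a (List.mem_of_getLast? hgl)
        · rw [hd1ne k hkx]; exact hinc k
      · intro k y hy
        by_cases hkx : k = x
        · subst hkx
          rw [hd1self] at hy
          rcases List.mem_append.mp hy with hy | hy
          · have := hbnd k y hy; omega
          · simp only [List.mem_singleton] at hy; omega
        · rw [hd1ne k hkx] at hy
          have := hbnd k y hy; omega
      · rw [haStep]
        unfold bGroup
        cases hgl : (d.getD x []).getLast? with
        | none => rw [hMv, hgl, hm]
        | some j => rw [hMv, hgl, hm]
    have := ih (s + 1) (bGroup d (s, x)) (aStep (last, m) (s, x)).1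
      (aStep (last, m) (s, x)).2 hstep
    have harith : s + 1 + (xs.length : Int) = s + ((x :: xs).length : Int) := by
      push_cast [List.length_cons]; ring
    rw [harith] at this
    simpa using this

-- ===== VERDICT (by name: the statement is the Claim_ definition above) =====
theorem match_enc (o : Option Int) :
    (match o with | some v => v | none => (-1 : Int)) = enc o := by
  cases o <;> rfl

theorem min_consecutive_cards_to_pick_up_spec : Claim_equal_min_consecutive_cards_to_pick_up := by
  intro cards _
  unfold Spec_min_consecutive_cards_to_pick_up
  unfold min_consecutive_cards_to_pick_up min_consecutive_cards_to_pick_up_alt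
  have h0 : AInv PySem.Dict.empty PySem.Dict.empty none 0 := by
    refine ⟨PySem.Dict.nodup_keys_empty, ?_, ?_, ?_, ?_, ?_⟩
    · intro v; simp [PySem.Dict.get?_empty, PySem.Dict.getD_empty]
    · intro k hk; simp [PySem.Dict.keys_empty] at hk
    · intro k; simp [PySem.Dict.getD_empty, IncL]
    · intro k y hy; simp [PySem.Dict.getD_empty] at hy
    · simp [Mv, PySem.Dict.keys_empty, Fv]
  obtain ⟨hnd, -, -, hinc, -, hm⟩ := loop_inv cards 0 _ _ _ h0
  have hvals := PySem.Dict.values_eq_map_keys _ hnd ([] : List Int)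
  rw [match_enc, hm]
  show enc (Mv _) = _
  rw [show (-1 : Int) = enc none from rfl,
    values_fold_enc _ none ?_ (by intro v hv; cases hv)]
  · rw [Mv, hvals]
  · intro L hL
    rw [hvals] at hL
    obtain ⟨k, -, rfl⟩ := List.mem_map.mp hL
    exact hinc k
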